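-- pv_equiv track=rewrite | github.com/mitdbg/treeline | simulator/belady_caching.py | compute_next_use
-- ===== SOURCE A (Python) =====
-- def compute_next_use(trace):
--     # Key to index of next use
--     next_use = {}
--     not_used_again = len(trace)
--
--     resulting_trace = []
--     for idx, req in enumerate(reversed(trace)):
--         curr_trace_idx = len(trace) - idx - 1
--         key = req[1]
--         if key not in next_use:
--             resulting_trace.append((req, not_used_again))
--         else:
--             resulting_trace.append((req, next_use[key]))
--         next_use[key] = curr_trace_idx
--
--     return list(reversed(resulting_trace))
-- ===== SOURCE B (Python) =====
-- def compute_next_use(trace):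
--     n = len(trace)
--     # First pass: index every key to the list of positions where it occurs.
--     occ = {}
--     for i, req in enumerate(trace):
--         occ.setdefault(req[1], []).append(i)
--     # Second pass, forward: pop past our own occurrence and peek the next one.
--     ptr = {}
--     out = []
--     for req in trace:
--         key = req[1]
--         lst = occ[key]
--         p = ptr.get(key, 0) + 1
--         ptr[key] = p
--         out.append((req, lst[p] if p < len(lst) else n))
--     return out
-- ===== Notes on version B (the rewrite author's own statement) =====
-- stated objective: alternative
-- what changed: Replaces the backward pass with a last-seen dict (plus final reversal) by a forward precomputed occurrence-index table: one pass builds, per key, the list of its positions, and a second forward pass peeks each key's next position, so the output is emitted in forward order with no reversal.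
import Mathlib
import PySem

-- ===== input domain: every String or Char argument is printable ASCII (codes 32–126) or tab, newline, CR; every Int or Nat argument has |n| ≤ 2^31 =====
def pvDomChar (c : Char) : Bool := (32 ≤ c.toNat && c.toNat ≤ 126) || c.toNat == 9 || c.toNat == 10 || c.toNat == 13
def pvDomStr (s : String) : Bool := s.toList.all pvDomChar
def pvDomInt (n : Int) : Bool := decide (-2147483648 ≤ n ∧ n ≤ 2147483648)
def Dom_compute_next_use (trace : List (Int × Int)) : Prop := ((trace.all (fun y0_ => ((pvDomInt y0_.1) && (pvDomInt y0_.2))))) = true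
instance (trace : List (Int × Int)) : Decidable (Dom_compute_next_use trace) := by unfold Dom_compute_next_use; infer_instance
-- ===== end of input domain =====

-- B replaces A's backward last-seen-dict pass (plus final reversal) by a forward
-- occurrence-index table and a forward peek pass (alternative decomposition, same cost).

-- ===== PORT A =====
-- the 'for idx, req in enumerate(reversed(trace))' loop; state = (next_use dict, resulting_trace)
def cnuA_loop : List (Int × Int) → Int → Int → PySem.Dict Int Int → List ((Int × Int) × Int) → List ((Int × Int) × Int)
  | [], _, _, _, res => res
  | req :: rs, idx, n, nu, res =>
    let curr := n - idx - 1
    let key := req.2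
    let res' := match nu.get? key with
      | none => res ++ [(req, n)]
      | some v => res ++ [(req, v)]
    cnuA_loop rs (idx + 1) n (nu.insert key curr) res'

def compute_next_use (trace : List (Int × Int)) : List ((Int × Int) × Int) :=
  (cnuA_loop trace.reverse 0 (trace.length : Int) PySem.Dict.empty []).reverse

-- ===== PORT B =====
-- first pass: occ.setdefault(req[1], []).append(i)
def cnuB_index : List (Int × Int) → Int → PySem.Dict Int (List Int) → PySem.Dict Int (List Int)
  | [], _, occ => occ
  | req :: rs, i, occ => cnuB_index rs (i + 1) (occ.insert req.2 (occ.getD req.2 [] ++ [i]))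

-- second pass: pop past our own occurrence, peek the next one (ptr counts kept as Nat:
-- they are the nonnegative Python ints used only as list indices, so indexing is exact)
def cnuB_out : List (Int × Int) → Int → PySem.Dict Int (List Int) → PySem.Dict Int Nat → List ((Int × Int) × Int)
  | [], _, _, _ => []
  | req :: rs, n, occ, ptr =>
    let key := req.2
    let lst := occ.getD key []
    let p := ptr.getD key 0 + 1
    let v := if h : p < lst.length then lst[p] else n
    (req, v) :: cnuB_out rs n occ (ptr.insert key p)

def compute_next_use_alt (trace : List (Int × Int)) : List ((Int × Int) × Int) :=
  cnuB_out trace (trace.length : Int) (cnuB_index trace 0 PySem.Dict.empty) PySem.Dict.empty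

-- ===== PRECONDITION & SPEC =====
def Spec_compute_next_use (trace : List (Int × Int)) (out : List ((Int × Int) × Int)) : Prop := out = compute_next_use_alt trace
instance (trace : List (Int × Int)) (out : List ((Int × Int) × Int)) : Decidable (Spec_compute_next_use trace out) := by unfold Spec_compute_next_use; infer_instance

-- ===== CLAIM (what is proved, stated in full; the proofs are below) =====
def Claim_equal_compute_next_use : Prop := ∀ (trace : List (Int × Int)), Dom_compute_next_use trace → Spec_compute_next_use trace (compute_next_use trace)

-- ===== LEMMAS AND PROOFS =====

-- first absolute index ≥ j of key k in the list (j = absolute index of the list's head)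
def fIdx (k : Int) : List (Int × Int) → Int → Option Int
  | [], _ => none
  | r :: rs, j => if r.2 = k then some j else fIdx k rs (j + 1)

-- annotations in A's processing order: q is the not-yet-processed reversed prefix
-- (its head sits at absolute index q.length - 1), suf the already-processed suffix
def annA (n : Int) : List (Int × Int) → List (Int × Int) → List ((Int × Int) × Int)
  | [], _ => []
  | x :: q', suf => (x, (fIdx x.2 suf ((q'.length : Int) + 1)).getD n) :: annA n q' (x :: suf)

-- forward annotations of l (head at absolute index i) with continuation suf
def annF2 (n : Int) : List (Int × Int) → List (Int × Int) → Int → List ((Int × Int) × Int)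
  | [], _, _ => []
  | x :: rs, suf, i => (x, (fIdx x.2 (rs ++ suf) (i + 1)).getD n) :: annF2 n rs suf (i + 1)

-- all absolute indices of key k in the list (head at absolute index j), increasing
def occIdx (k : Int) : List (Int × Int) → Int → List Int
  | [], _ => []
  | r :: rs, j => (if r.2 = k then [j] else []) ++ occIdx k rs (j + 1)

theorem loopA (q : List (Int × Int)) : ∀ (suf : List (Int × Int)) (n : Int)
    (d : PySem.Dict Int Int) (res : List ((Int × Int) × Int)),
    n = q.length + suf.length →
    (∀ k, d.get? k = fIdx k suf (q.length : Int)) →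
    cnuA_loop q (suf.length : Int) n d res = res ++ annA n q suf := by
  induction q with
  | nil => intro suf n d res hn hd; simp [cnuA_loop, annA]
  | cons x q' ih =>
    intro suf n d res hn hd
    have hcurr : n - (suf.length : Int) - 1 = (q'.length : Int) := by
      simp [List.length_cons] at hn; omega
    have hd' : ∀ k, (d.insert x.2 (n - (suf.length : Int) - 1)).get? k
        = fIdx k (x :: suf) (q'.length : Int) := by
      intro k
      rw [PySem.Dict.get?_insert]
      by_cases hk : x.2 = k
      · simp [fIdx, hk, hcurr]
      · have : ¬ k = x.2 := fun h => hk h.symm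
        simp [fIdx, hk, this, hd k, List.length_cons]
    have hval : d.get? x.2 = fIdx x.2 suf ((q'.length : Int) + 1) := by
      rw [hd x.2]; simp [List.length_cons]
    have hstep := ih (x :: suf) n (d.insert x.2 (n - (suf.length : Int) - 1))
      (res ++ [(x, (fIdx x.2 suf ((q'.length : Int) + 1)).getD n)])
      (by simp [List.length_cons] at hn ⊢; omega) hd'
    show cnuA_loop (x :: q') (suf.length : Int) n d res = _
    rw [cnuA_loop]
    have harg : ((suf.length : Int) + 1) = (((x :: suf).length : Nat) : Int) := by
      simp [List.length_cons]
    rcases hopt : d.get? x.2 with _ | v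
    · have hthis : fIdx x.2 suf ((q'.length : Int) + 1) = none := by rw [← hval, hopt]
      rw [hthis] at hstep
      simp only [harg, annA, hthis, Option.getD_none]
      simpa using hstep
    · have hthis : fIdx x.2 suf ((q'.length : Int) + 1) = some v := by rw [← hval, hopt]
      rw [hthis] at hstep
      simp only [harg, annA, hthis, Option.getD_some]
      simpa using hstep

theorem annF2_append_singleton (n : Int) (x : Int × Int) :
    ∀ (l suf : List (Int × Int)) (i : Int),
    annF2 n (l ++ [x]) suf i
      = annF2 n l (x :: suf) i ++ [(x, (fIdx x.2 suf (i + l.length + 1)).getD n)] := by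
  intro l
  induction l with
  | nil => intro suf i; simp [annF2]
  | cons y l ih =>
    intro suf i
    have h1 : (l ++ [x]) ++ suf = l ++ (x :: suf) := by simp
    have h2 : (i + 1) + (l.length : Int) + 1 = i + ((y :: l).length : Int) + 1 := by
      simp only [List.length_cons]; push_cast; ring
    simp only [List.cons_append, annF2, h1, ih, h2]

theorem bridgeA (n : Int) : ∀ (q suf : List (Int × Int)),
    (annA n q suf).reverse = annF2 n q.reverse suf 0 := by
  intro q
  induction q with
  | nil => intro suf; simp [annA, annF2]
  | cons x q' ih =>
    intro suf
    simp only [annA, List.reverse_cons, ih, List.reverse_cons]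
    rw [annF2_append_singleton]
    congr 3; simp

theorem occ_spec : ∀ (l : List (Int × Int)) (i : Int) (d : PySem.Dict Int (List Int)) (k : Int),
    (cnuB_index l i d).getD k [] = d.getD k [] ++ occIdx k l i := by
  intro l
  induction l with
  | nil => intro i d k; simp [cnuB_index, occIdx]
  | cons r rs ih =>
    intro i d k
    rw [cnuB_index, ih]
    rw [PySem.Dict.getD_insert]
    by_cases hk : k = r.2
    · simp [occIdx, hk]
    · have : ¬ r.2 = k := fun h => hk h.symm
      simp [occIdx, hk, this]

theorem fIdx_head (k : Int) : ∀ (l : List (Int × Int)) (j : Int),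
    fIdx k l j = (occIdx k l j).head? := by
  intro l
  induction l with
  | nil => intro j; simp [fIdx, occIdx]
  | cons r rs ih =>
    intro j
    by_cases h : r.2 = k
    · simp [fIdx, occIdx, h]
    · simp [fIdx, occIdx, h, ih]

theorem occ_append (k : Int) : ∀ (l1 l2 : List (Int × Int)) (j : Int),
    occIdx k (l1 ++ l2) j = occIdx k l1 j ++ occIdx k l2 (j + l1.length) := by
  intro l1
  induction l1 with
  | nil => intro l2 j; simp [occIdx]
  | cons r rs ih =>
    intro l2 j
    have h2 : (j + 1) + (rs.length : Int) = j + ((r :: rs).length : Int) := by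
      simp only [List.length_cons]; push_cast; ring
    simp only [List.cons_append, occIdx, ih, h2, List.append_assoc]

theorem loopB (t : List (Int × Int)) (n : Int) (_hn : n = t.length)
    (occ : PySem.Dict Int (List Int)) (hocc : ∀ k, occ.getD k [] = occIdx k t 0) :
    ∀ (rest pre : List (Int × Int)) (ptr : PySem.Dict Int Nat),
    t = pre ++ rest →
    (∀ k, ptr.getD k 0 = (occIdx k pre 0).length) →
    cnuB_out rest n occ ptr = annF2 n rest [] (pre.length : Int) := by
  intro rest
  induction rest with
  | nil => intro pre ptr ht hp; simp [cnuB_out, annF2]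
  | cons x rs ih =>
    intro pre ptr ht hp
    set k := x.2 with hk
    set A0 := occIdx k pre 0 with hA0
    set j : Int := (pre.length : Int) with hj
    set R := occIdx k rs (j + 1) with hR
    have hlst : occ.getD k [] = A0 ++ j :: R := by
      rw [hocc k, ht, occ_append]
      simp only [occIdx, ← hk]
      simp [← hA0, ← hj, ← hR]
    have hps : ptr.getD k 0 + 1 = A0.length + 1 := by rw [hp k]
    have hfr : fIdx k rs (j + 1) = R.head? := by rw [fIdx_head, hR]
    -- the peeked value equals the first next occurrence
    have hval : (if h : ptr.getD k 0 + 1 < (occ.getD k []).length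
          then (occ.getD k [])[ptr.getD k 0 + 1] else n)
        = (fIdx k rs (j + 1)).getD n := by
      rw [hfr, hlst, hps]
      rcases R with _ | ⟨r0, R'⟩
      · simp
      · have hlen : A0.length + 1 < (A0 ++ j :: r0 :: R').length := by
          simp [List.length_append]
        rw [dif_pos hlen]
        have : (A0 ++ j :: r0 :: R')[A0.length + 1] = r0 := by
          rw [List.getElem_append_right (by omega)]
          simp
        simp [this]
    have hp' : ∀ k', (ptr.insert k (ptr.getD k 0 + 1)).getD k' 0
        = (occIdx k' (pre ++ [x]) 0).length := by
      intro k'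
      rw [PySem.Dict.getD_insert, occ_append]
      by_cases hkk : k' = k
      · subst hkk
        simp [occIdx, ← hk, hps, ← hA0]
      · have : ¬ x.2 = k' := fun h => hkk (by rw [← h, hk])
        simp [hkk, occIdx, this, hp k']
    have hrec := ih (pre ++ [x]) (ptr.insert k (ptr.getD k 0 + 1))
      (by rw [ht]; simp) hp'
    show cnuB_out (x :: rs) n occ ptr = _
    rw [cnuB_out]
    simp only [← hk, hval, hrec, annF2]
    simp [hk, hj]

-- ===== VERDICT (by name: the statement is the Claim_ definition above) =====
theorem compute_next_use_spec : Claim_equal_compute_next_use := by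
  intro trace _
  show compute_next_use trace = compute_next_use_alt trace
  have hA : compute_next_use trace
      = annF2 (trace.length : Int) trace [] 0 := by
    unfold compute_next_use
    rw [show (0 : Int) = (([] : List (Int × Int)).length : Int) by simp,
      loopA trace.reverse [] (trace.length : Int) PySem.Dict.empty []
        (by simp) (by intro k; simp [fIdx, PySem.Dict.get?_empty])]
    simp [bridgeA]
  have hB : compute_next_use_alt trace
      = annF2 (trace.length : Int) trace [] 0 := by
    unfold compute_next_use_alt
    have := loopB trace (trace.length : Int) rfl
      (cnuB_index trace 0 PySem.Dict.empty)
      (by intro k; rw [occ_spec]; simp [PySem.Dict.getD_empty])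
      trace [] PySem.Dict.empty (by simp)
      (by intro k; simp [occIdx, PySem.Dict.getD_empty])
    simpa using this
  rw [hA, hB]
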